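-- pv_equiv track=rewrite | github.com/yobra98/alx-interview | 0x02-minimum_operations/0b-minoperations.py | candidate_range
-- ===== SOURCE A (Python) =====
-- def candidate_range(n):
--     cur = 5
--     incr = 2
--     while cur < n+1:
--         yield cur
--         cur += incr
--         incr ^= 6  # or incr = 6-incr, or however
--         "toggle between 2 and 4 increment (bitwise xor)"
-- ===== SOURCE B (Python) =====
-- def candidate_range(n):
--     for x in range(5, n + 1):
--         if x % 2 and x % 3:
--             yield x
-- ===== Notes on version B (the rewrite author's own statement) =====
-- stated objective: simpler
-- what changed: Replaces A's stateful wheel walk (running counter with a xor-toggled increment) by a stateless trial-division filter: iterate every integer of the range from five up to n and keep those divisible by neither two nor three.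
import Mathlib
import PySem

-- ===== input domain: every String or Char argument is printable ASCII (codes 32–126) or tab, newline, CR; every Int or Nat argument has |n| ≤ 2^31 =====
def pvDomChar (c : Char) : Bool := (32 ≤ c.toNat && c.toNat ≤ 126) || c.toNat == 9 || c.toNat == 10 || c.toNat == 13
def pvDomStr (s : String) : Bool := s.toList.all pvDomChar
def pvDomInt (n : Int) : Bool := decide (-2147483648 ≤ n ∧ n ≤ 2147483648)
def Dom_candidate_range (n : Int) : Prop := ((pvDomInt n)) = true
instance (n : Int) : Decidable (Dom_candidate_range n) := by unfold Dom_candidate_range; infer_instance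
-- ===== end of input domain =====

-- B replaces A's stateful wheel walk by a stateless divisibility filter over the whole range (simpler);
-- both Pythons are generators, the equivalence is about the list of yielded values.

-- ===== PORT A =====
-- cur = 5; incr = 2; while cur < n+1: yield cur; cur += incr; incr ^= 6.
-- incr stays in {2, 4}; that fact is carried as a proof argument only so Lean sees termination.
def candidate_range_go (n cur incr : Int) (h : incr = 2 ∨ incr = 4) : List Int :=
  if _hc : cur < n + 1 then
    cur :: candidate_range_go n (cur + incr) (PySem.Int.bxor incr 6)
      (by rcases h with h | h <;> subst h <;> [right; left] <;> decide)
  else []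
termination_by (n + 1 - cur).toNat
decreasing_by rcases h with h | h <;> subst h <;> omega

def candidate_range (n : Int) : List Int := candidate_range_go n 5 2 (Or.inl rfl)

-- ===== PORT B =====
-- for x in range(5, n+1): if x % 2 and x % 3: yield x.
def candidate_range_alt (n : Int) : List Int :=
  (PySem.List.pyRange 5 (n + 1) 1).filter
    (fun x => (PySem.Int.mod x 2 != 0) && (PySem.Int.mod x 3 != 0))

-- ===== PRECONDITION & SPEC =====
def Spec_candidate_range (n : Int) (out : List Int) : Prop := out = candidate_range_alt n
instance (n : Int) (out : List Int) : Decidable (Spec_candidate_range n out) := by unfold Spec_candidate_range; infer_instance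

-- ===== CLAIM (what is proved, stated in full; the proofs are below) =====
def Claim_equal_candidate_range : Prop := ∀ (n : Int), Dom_candidate_range n → Spec_candidate_range n (candidate_range n)

-- ===== LEMMAS AND PROOFS =====

-- the filter predicate of port B, named for the proofs
def pvP (x : Int) : Bool := (PySem.Int.mod x 2 != 0) && (PySem.Int.mod x 3 != 0)

theorem pvP_iff (x : Int) : pvP x = true ↔ x % 6 = 1 ∨ x % 6 = 5 := by
  simp [pvP, PySem.Int.mod, Int.fmod_eq_emod]
  omega

-- dropping one rejected head of the range does not change the filtered list
theorem filter_step (a c : Int) (hp : pvP a = false) :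
    (PySem.List.pyRange a c 1).filter pvP = (PySem.List.pyRange (a + 1) c 1).filter pvP := by
  by_cases hac : a < c
  · rw [PySem.List.pyRange_one_cons hac, List.filter_cons_of_neg (by simp [hp])]
  · rw [PySem.List.pyRange_one_eq_nil (by omega), PySem.List.pyRange_one_eq_nil (by omega)]

theorem go_congr (n c c' i i' : Int) (h : i = 2 ∨ i = 4) (h' : i' = 2 ∨ i' = 4)
    (ec : c = c') (ei : i = i') :
    candidate_range_go n c i h = candidate_range_go n c' i' h' := by
  subst ec; subst ei; rfl

theorem filter_eq_go (m : Nat) : ∀ (n cur incr : Int) (h : incr = 2 ∨ incr = 4),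
    (n + 1 - cur).toNat ≤ m →
    ((incr = 2 ∧ cur % 6 = 5) ∨ (incr = 4 ∧ cur % 6 = 1)) →
    (PySem.List.pyRange cur (n + 1) 1).filter pvP = candidate_range_go n cur incr h := by
  induction m with
  | zero =>
    intro n cur incr h hm _
    rw [candidate_range_go, dif_neg (by omega), PySem.List.pyRange_one_eq_nil (by omega)]
    rfl
  | succ m ih =>
    intro n cur incr h hm hinv
    rw [candidate_range_go]
    by_cases hc : cur < n + 1
    · rw [dif_pos hc, PySem.List.pyRange_one_cons hc,
        List.filter_cons_of_pos (by rw [pvP_iff]; omega)]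
      rcases hinv with ⟨hi, hmod⟩ | ⟨hi, hmod⟩ <;> subst hi
      · -- incr = 2: skip cur+1 (divisible by 6), land on cur+2 ≡ 1 (mod 6)
        rw [filter_step _ _ (by simp only [Bool.eq_false_iff, Ne, pvP_iff]; omega),
          ih n (cur + 1 + 1) 4 (Or.inr rfl) (by omega) (by omega)]
        exact congrArg _ (go_congr _ _ _ _ _ _ _ (by ring) (by decide))
      · -- incr = 4: skip cur+1, cur+2, cur+3 (≡ 2, 3, 4 mod 6), land on cur+4 ≡ 5 (mod 6)
        rw [filter_step _ _ (by simp only [Bool.eq_false_iff, Ne, pvP_iff]; omega),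
          filter_step _ _ (by simp only [Bool.eq_false_iff, Ne, pvP_iff]; omega),
          filter_step _ _ (by simp only [Bool.eq_false_iff, Ne, pvP_iff]; omega),
          ih n (cur + 1 + 1 + 1 + 1) 2 (Or.inl rfl) (by omega) (by omega)]
        exact congrArg _ (go_congr _ _ _ _ _ _ _ (by ring) (by decide))
    · rw [dif_neg hc, PySem.List.pyRange_one_eq_nil (by omega)]
      rfl

-- ===== VERDICT (by name: the statement is the Claim_ definition above) =====
theorem candidate_range_spec : Claim_equal_candidate_range := by
  intro n _
  unfold Spec_candidate_range candidate_range candidate_range_alt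
  exact (filter_eq_go (n + 1 - 5).toNat n 5 2 (Or.inl rfl) le_rfl (Or.inl ⟨rfl, by decide⟩)).symm
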